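-- pv_equiv track=rewrite | github.com/DevilCoders/Yandex | cloud/mdb/salt/salt/components/redis/sentinel/conf/repair_sentinel.py | is_valid_config
-- ===== SOURCE A (Python) =====
-- def is_valid_config(config_lines, port):
--     """
--     Check that config has all the required lines.
--     """
--     required = [
--         'daemonize yes', 'port {}'.format(port), 'protected-mode no',
--         'sentinel set-disable yes', 'dir /var/lib/redis',
--     ]
--
--     return all(
--         any(line in cl.replace('"', '') for cl in config_lines)
--         for line in required)
-- ===== SOURCE B (Python) =====
-- def is_valid_config(config_lines, port):
--     """
--     Check that config has all the required lines.
--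
--     Single pass over config_lines with five independent found-flags,
--     one per requirement; no requirement list, no rescans.
--     """
--     port_line = 'port {}'.format(port)
--     f_daemonize = f_port = f_protected = f_sentinel = f_dir = False
--     for cl in config_lines:
--         c = cl.replace('"', '')
--         f_daemonize = f_daemonize or 'daemonize yes' in c
--         f_port = f_port or port_line in c
--         f_protected = f_protected or 'protected-mode no' in c
--         f_sentinel = f_sentinel or 'sentinel set-disable yes' in c
--         f_dir = f_dir or 'dir /var/lib/redis' in c
--     return f_daemonize and f_port and f_protected and f_sentinel and f_dir
-- ===== Notes on version B (the rewrite author's own statement) =====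
-- stated objective: alternative
-- what changed: Replaced A's requirement-by-requirement rescans (all/any generator over a requirements list) with one explicit pass over config_lines updating five independent boolean found-flags, conjoined at the end.
import Mathlib
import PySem

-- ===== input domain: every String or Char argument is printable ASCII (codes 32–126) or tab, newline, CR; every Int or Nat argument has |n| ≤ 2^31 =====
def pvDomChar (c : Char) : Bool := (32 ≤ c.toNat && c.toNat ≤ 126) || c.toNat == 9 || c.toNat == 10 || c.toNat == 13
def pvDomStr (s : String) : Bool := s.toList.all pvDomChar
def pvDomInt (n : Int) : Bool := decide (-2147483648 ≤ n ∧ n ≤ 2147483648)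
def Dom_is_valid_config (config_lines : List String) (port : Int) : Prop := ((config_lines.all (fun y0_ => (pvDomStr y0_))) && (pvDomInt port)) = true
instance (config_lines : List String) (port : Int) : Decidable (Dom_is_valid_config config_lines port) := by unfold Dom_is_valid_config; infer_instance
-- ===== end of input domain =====

-- B replaces A's requirement-by-requirement rescans (all/any over a requirements list)
-- with one pass over config_lines carrying five boolean found-flags (objective: alternative).

-- ===== PORT A =====
def is_valid_config (config_lines : List String) (port : Int) : Bool :=
  let required : List String :=
    ["daemonize yes", "port " ++ PySem.Int.toStr port, "protected-mode no",
     "sentinel set-disable yes", "dir /var/lib/redis"]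
  required.all (fun line =>
    config_lines.any (fun cl => PySem.Str.isIn line (PySem.Str.replace cl "\"" "")))

-- ===== PORT B =====
def is_valid_config_alt (config_lines : List String) (port : Int) : Bool :=
  let port_line : String := "port " ++ PySem.Int.toStr port
  let flags : Bool × Bool × Bool × Bool × Bool :=
    config_lines.foldl (fun s cl =>
      let c := PySem.Str.replace cl "\"" ""
      (s.1 || PySem.Str.isIn "daemonize yes" c,
       s.2.1 || PySem.Str.isIn port_line c,
       s.2.2.1 || PySem.Str.isIn "protected-mode no" c,
       s.2.2.2.1 || PySem.Str.isIn "sentinel set-disable yes" c,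
       s.2.2.2.2 || PySem.Str.isIn "dir /var/lib/redis" c))
      (false, false, false, false, false)
  flags.1 && flags.2.1 && flags.2.2.1 && flags.2.2.2.1 && flags.2.2.2.2

-- ===== PRECONDITION & SPEC =====
def Spec_is_valid_config (config_lines : List String) (port : Int) (out : Bool) : Prop := out = is_valid_config_alt config_lines port
instance (config_lines : List String) (port : Int) (out : Bool) : Decidable (Spec_is_valid_config config_lines port out) := by unfold Spec_is_valid_config; infer_instance

-- ===== CLAIM (what is proved, stated in full; the proofs are below) =====
def Claim_equal_is_valid_config : Prop := ∀ (config_lines : List String) (port : Int), Dom_is_valid_config config_lines port → Spec_is_valid_config config_lines port (is_valid_config config_lines port)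

-- ===== LEMMAS AND PROOFS =====

/-- The componentwise-or fold over five flags computes `any` of each predicate. -/
theorem foldl_flags (cls : List String) (p1 p2 p3 p4 p5 : String → Bool)
    (b1 b2 b3 b4 b5 : Bool) :
    cls.foldl (fun (s : Bool × Bool × Bool × Bool × Bool) cl =>
        (s.1 || p1 cl, s.2.1 || p2 cl, s.2.2.1 || p3 cl,
         s.2.2.2.1 || p4 cl, s.2.2.2.2 || p5 cl)) (b1, b2, b3, b4, b5)
      = (b1 || cls.any p1, b2 || cls.any p2, b3 || cls.any p3,
         b4 || cls.any p4, b5 || cls.any p5) := by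
  induction cls generalizing b1 b2 b3 b4 b5 with
  | nil => simp
  | cons c cs ih =>
    simp [List.foldl_cons, ih, List.any_cons, Bool.or_assoc]

-- ===== VERDICT (by name: the statement is the Claim_ definition above) =====
theorem is_valid_config_spec : Claim_equal_is_valid_config := by
  intro config_lines port _
  unfold Spec_is_valid_config is_valid_config is_valid_config_alt
  simp [foldl_flags, Bool.and_assoc]
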